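-- pv_equiv track=rewrite | github.com/FelixZhang028/waste_incineration | src/mtsc_train/cli.py | _label_names_by_id
-- ===== SOURCE A (Python) =====
-- def _label_names_by_id(label_map: dict[str, int]) -> list[str]:
--     pairs = sorted(((idx, name) for name, idx in label_map.items()), key=lambda x: x[0])
--     if not pairs:
--         raise ValueError("label_map cannot be empty")
--     expected = list(range(len(pairs)))
--     got = [idx for idx, _ in pairs]
--     if got != expected:
--         raise ValueError(f"label ids must be contiguous from 0, got {got}")
--     return [name for _, name in pairs]
-- ===== SOURCE B (Python) =====
-- def _label_names_by_id(label_map: dict[str, int]) -> list[str]: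
--     if not label_map:
--         raise ValueError("label_map cannot be empty")
--     n = len(label_map)
--     result = [None] * n
--     seen = set()
--     for name, idx in label_map.items():
--         if idx < 0 or idx >= n or idx in seen:
--             raise ValueError(f"label ids must be contiguous from 0, got {sorted(label_map.values())}")
--         seen.add(idx)
--         result[idx] = name
--     return result
-- ===== Notes on version B (the rewrite author's own statement) =====
-- stated objective: alternative
-- what changed: B places each name directly into a preallocated slot by its id (one pass with a seen-set) instead of sorting the (id, name) pairs and comparing the id column against range(n).
import Mathlib
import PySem

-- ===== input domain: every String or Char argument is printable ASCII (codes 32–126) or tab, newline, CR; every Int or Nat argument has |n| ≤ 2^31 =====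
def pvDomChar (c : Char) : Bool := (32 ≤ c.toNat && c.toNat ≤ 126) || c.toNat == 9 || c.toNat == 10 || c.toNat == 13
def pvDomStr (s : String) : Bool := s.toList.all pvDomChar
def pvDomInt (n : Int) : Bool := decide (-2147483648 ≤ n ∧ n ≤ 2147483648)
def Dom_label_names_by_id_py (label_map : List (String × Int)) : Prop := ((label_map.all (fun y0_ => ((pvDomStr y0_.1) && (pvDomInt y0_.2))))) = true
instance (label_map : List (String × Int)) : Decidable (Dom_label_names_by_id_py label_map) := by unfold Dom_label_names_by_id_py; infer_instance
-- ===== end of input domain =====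

-- B replaces A's sort-then-compare-to-range(n) by a single pass that places each
-- name directly into a preallocated slot by its id (alternative algorithm, O(n) vs O(n log n));
-- on the ValueError paths (empty map / non-contiguous ids) both raise, excluded by Pre_.

-- ===== PORT A =====
-- On the two `raise ValueError` paths the Python returns no value; the port returns []
-- there; Pre_ excludes exactly those inputs.
def label_names_by_id_py (label_map : List (String × Int)) : List String :=
  let pairs := PySem.List.sorted
      (((PySem.Dict.ofList label_map).items).map (fun p => (p.2, p.1))) (fun x => x.1)
  if pairs = [] then []  -- raise ValueError("label_map cannot be empty")
  else
    let expected := (List.range pairs.length).map (fun i : Nat => (i : Int))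
    let got := pairs.map (fun p => p.1)
    if got ≠ expected then []  -- raise ValueError("label ids must be contiguous from 0, …")
    else pairs.map (fun p => p.2)

-- ===== PORT B =====
-- one loop step of B: state = some (result slots, seen set); none = the ValueError path
def altStep (n : Nat) (st : Option (List (Option String) × PySem.Set Int))
    (p : String × Int) : Option (List (Option String) × PySem.Set Int) :=
  match st with
  | none => none
  | some (res, seen) =>
    if p.2 < 0 ∨ (n : Int) ≤ p.2 ∨ PySem.Set.contains seen p.2 then none  -- raise ValueError
    else some (res.set p.2.toNat (some p.1), PySem.Set.add seen p.2)

def label_names_by_id_py_alt (label_map : List (String × Int)) : List String :=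
  let items := (PySem.Dict.ofList label_map).items
  if items = [] then []  -- raise ValueError("label_map cannot be empty")
  else
    let n := items.length
    match items.foldl (altStep n) (some (List.replicate n (none : Option String), PySem.Set.empty)) with
    | none => []  -- raise ValueError("label ids must be contiguous from 0, …")
    | some (res, _) => res.map (fun o => o.getD "")

-- ===== PRECONDITION & SPEC =====
-- Pre_: the dict built from label_map is nonempty and its values are exactly 0..n-1
-- (each value in range and occurring once) — exactly where the Python A returns
-- instead of raising ValueError.
def Pre_label_names_by_id_py (label_map : List (String × Int)) : Prop :=
  let d := (PySem.Dict.ofList label_map).items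
  d ≠ [] ∧ ∀ p ∈ d, 0 ≤ p.2 ∧ p.2 < d.length ∧ (d.map Prod.snd).count p.2 = 1

instance (label_map : List (String × Int)) : Decidable (Pre_label_names_by_id_py label_map) := by
  unfold Pre_label_names_by_id_py; infer_instance

def pvWitness_label_names_by_id_py : (List (String × Int)) := [("neg", 1), ("pos", 0)]

def Spec_label_names_by_id_py (label_map : List (String × Int)) (out : List String) : Prop := out = label_names_by_id_py_alt label_map
instance (label_map : List (String × Int)) (out : List String) : Decidable (Spec_label_names_by_id_py label_map out) := by unfold Spec_label_names_by_id_py; infer_instance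

-- ===== CLAIM (what is proved, stated in full; the proofs are below) =====
def Claim_equal_label_names_by_id_py : Prop := ∀ (label_map : List (String × Int)), Dom_label_names_by_id_py label_map → Pre_label_names_by_id_py label_map → Spec_label_names_by_id_py label_map (label_names_by_id_py label_map)

-- ===== LEMMAS AND PROOFS =====

-- the (unique) name carrying id i, read off by first match
def nmAt (d : List (String × Int)) (i : Int) : Option String :=
  (d.find? (fun p => p.2 == i)).map Prod.fst

-- the canonical answer both ports compute
def canonPairs (d : List (String × Int)) : List (Int × String) :=
  (List.range d.length).map (fun i : Nat => ((i : Int), (nmAt d (i : Int)).getD ""))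

theorem find?_eq_some_of_count_one {d : List (String × Int)} {k : String} {v : Int}
    (h1 : (d.map Prod.snd).count v = 1) (hm : (k, v) ∈ d) :
    d.find? (fun p => p.2 == v) = some (k, v) := by
  induction d with
  | nil => cases hm
  | cons q t ih =>
    by_cases hq : q.2 = v
    · have hc : (t.map Prod.snd).count v = 0 := by
        simp [hq] at h1 ⊢
        omega
      have hvnot : v ∉ t.map Prod.snd := by
        simpa [List.count_eq_zero] using hc
      have : (k, v) = q := by
        rcases List.mem_cons.mp hm with h | h
        · exact h
        · exact absurd (List.mem_map.mpr ⟨(k, v), h, rfl⟩) hvnot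
      simp [← this]
    · have hm' : (k, v) ∈ t := by
        rcases List.mem_cons.mp hm with h | h
        · exact absurd (congrArg Prod.snd h.symm) hq
        · exact h
      have h1' : (t.map Prod.snd).count v = 1 := by
        simpa [List.count_cons, hq] using h1
      simp [hq, ih h1' hm']

-- the values of d are a rearrangement of 0..n-1
theorem vals_perm {d : List (String × Int)}
    (hv : ∀ p ∈ d, 0 ≤ p.2 ∧ p.2 < d.length ∧ (d.map Prod.snd).count p.2 = 1) :
    (d.map Prod.snd).Perm ((List.range d.length).map (fun i : Nat => (i : Int))) := by
  have hnd : (d.map Prod.snd).Nodup := by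
    rw [List.nodup_iff_count_le_one]
    intro a
    by_cases ha : a ∈ d.map Prod.snd
    · rcases List.mem_map.mp ha with ⟨p, hp, hpe⟩
      have h1 := (hv p hp).2.2
      rw [← hpe]
      omega
    · simp [List.count_eq_zero.mpr ha]
  have hsub : d.map Prod.snd ⊆ (List.range d.length).map (fun i : Nat => (i : Int)) := by
    intro a ha
    rcases List.mem_map.mp ha with ⟨p, hp, hpe⟩
    rcases hv p hp with ⟨h0, hlt, _⟩
    subst hpe
    simp only [List.mem_map]
    exact ⟨p.2.toNat, List.mem_range.mpr (by omega), by omega⟩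
  have hsp := List.subperm_of_subset hnd hsub
  exact hsp.perm_of_length_le (by simp)

theorem mem_canonPairs_iff {d : List (String × Int)}
    (hv : ∀ p ∈ d, 0 ≤ p.2 ∧ p.2 < d.length ∧ (d.map Prod.snd).count p.2 = 1)
    (v : Int) (k : String) :
    (v, k) ∈ canonPairs d ↔ (k, v) ∈ d := by
  constructor
  · intro h
    rw [canonPairs, List.mem_map] at h
    obtain ⟨i, hi, he⟩ := h
    have hv1 : ((i : Nat) : Int) = v := congrArg Prod.fst he
    have hk1 : (nmAt d ((i : Nat) : Int)).getD "" = k := congrArg Prod.snd he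
    have hvmem : v ∈ d.map Prod.snd := by
      rw [(vals_perm hv).mem_iff]
      exact List.mem_map.mpr ⟨i, hi, hv1⟩
    rcases List.mem_map.mp hvmem with ⟨p, hp, hpe⟩
    have hcnt : (d.map Prod.snd).count p.2 = 1 := (hv p hp).2.2
    have hfind0 : d.find? (fun q => q.2 == p.2) = some (p.1, p.2) :=
      find?_eq_some_of_count_one hcnt (by simpa using hp)
    have hfind : d.find? (fun q => q.2 == ((i : Nat) : Int)) = some (p.1, p.2) := by
      rw [hv1, ← hpe]; exact hfind0
    have hk : k = p.1 := by
      rw [← hk1, nmAt, hfind]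
      rfl
    have : (k, v) = p := by
      rw [hk, ← hpe]
    rw [this]
    exact hp
  · intro h
    have hcnt := (hv (k, v) h).2.2
    have hfind := find?_eq_some_of_count_one hcnt h
    have h0 := (hv (k, v) h).1
    have hlt := (hv (k, v) h).2.1
    have hvt : ((v.toNat : Nat) : Int) = v := by omega
    rw [canonPairs, List.mem_map]
    refine ⟨v.toNat, List.mem_range.mpr (by omega), ?_⟩
    rw [hvt]
    simp [nmAt, hfind]

theorem map_fst_canonPairs (d : List (String × Int)) :
    (canonPairs d).map Prod.fst = (List.range d.length).map (fun i : Nat => (i : Int)) := by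
  rw [canonPairs, List.map_map]
  rfl

theorem canonPairs_perm {d : List (String × Int)}
    (hv : ∀ p ∈ d, 0 ≤ p.2 ∧ p.2 < d.length ∧ (d.map Prod.snd).count p.2 = 1) :
    (canonPairs d).Perm (d.map (fun p => (p.2, p.1))) := by
  have hvnd : (d.map Prod.snd).Nodup := (vals_perm hv).nodup_iff.mpr
    (List.Nodup.map (fun a b h => by exact_mod_cast h) List.nodup_range)
  have hnd1 : (canonPairs d).Nodup := by
    have : ((canonPairs d).map Prod.fst).Nodup := by
      rw [map_fst_canonPairs]
      exact List.Nodup.map (fun a b h => by exact_mod_cast h) List.nodup_range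
    exact this.of_map
  have hnd2 : (d.map (fun p => (p.2, p.1))).Nodup := by
    have : ((d.map (fun p => (p.2, p.1))).map Prod.fst).Nodup := by
      rw [List.map_map]
      exact hvnd
    exact this.of_map
  rw [List.perm_ext_iff_of_nodup hnd1 hnd2]
  intro a
  obtain ⟨v, k⟩ := a
  rw [mem_canonPairs_iff hv v k]
  constructor
  · intro h
    exact List.mem_map.mpr ⟨(k, v), h, rfl⟩
  · intro h
    rcases List.mem_map.mp h with ⟨p, hp, hpe⟩
    have hp1 : p.2 = v := congrArg Prod.fst hpe
    have hp2 : p.1 = k := congrArg Prod.snd hpe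
    have : (k, v) = p := by rw [← hp1, ← hp2]
    rw [this]
    exact hp

theorem canonPairs_pairwise (d : List (String × Int)) :
    (canonPairs d).Pairwise (fun a b => a.1 < b.1) := by
  rw [canonPairs, List.pairwise_map]
  refine List.pairwise_lt_range.imp ?_
  intro a b h
  show (a : Int) < (b : Int)
  exact_mod_cast h

theorem sortedA_eq_canon {d : List (String × Int)}
    (hv : ∀ p ∈ d, 0 ≤ p.2 ∧ p.2 < d.length ∧ (d.map Prod.snd).count p.2 = 1) :
    PySem.List.sorted (d.map (fun p => (p.2, p.1))) (fun x => x.1) = canonPairs d :=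
  PySem.List.sorted_eq_of_perm_of_pairwise_lt (d.map (fun p => (p.2, p.1))) (canonPairs d)
    (fun x => x.1) (canonPairs_perm hv) (canonPairs_pairwise d)

-- B's loop: the result slots after processing a prefix `pre`
def slots (d pre : List (String × Int)) : List (Option String) :=
  (List.range d.length).map (fun j : Nat => nmAt pre (j : Int))

theorem slots_nil (d : List (String × Int)) :
    slots d [] = List.replicate d.length (none : Option String) := by
  simp [slots, nmAt, List.map_const']

theorem count_pre_zero {d pre suf : List (String × Int)} {p : String × Int}
    (hd : d = pre ++ p :: suf) (hcnt : (d.map Prod.snd).count p.2 = 1) :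
    (pre.map Prod.snd).count p.2 = 0 := by
  subst hd
  simp [List.count_append] at hcnt ⊢
  omega

theorem foldl_altStep_inv {d : List (String × Int)}
    (hv : ∀ p ∈ d, 0 ≤ p.2 ∧ p.2 < d.length ∧ (d.map Prod.snd).count p.2 = 1) :
    ∀ (suf pre : List (String × Int)), d = pre ++ suf →
      suf.foldl (altStep d.length)
          (some (slots d pre, PySem.Set.ofList (pre.map Prod.snd)))
        = some (slots d d, PySem.Set.ofList (d.map Prod.snd)) := by
  intro suf
  induction suf with
  | nil => intro pre hd; simp [hd]
  | cons p t ih =>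
    intro pre hd
    have hp : p ∈ d := by rw [hd]; simp
    rcases hv p hp with ⟨h0, hlt, hcnt⟩
    have hpre0 : (pre.map Prod.snd).count p.2 = 0 := count_pre_zero hd hcnt
    have hnotmem : p.2 ∉ pre.map Prod.snd := by simpa [List.count_eq_zero] using hpre0
    have hguard : ¬ (p.2 < 0 ∨ (d.length : Int) ≤ p.2 ∨
        PySem.Set.contains (PySem.Set.ofList (pre.map Prod.snd)) p.2) := by
      rw [not_or, not_or]
      simp only [not_lt, Bool.not_eq_true]
      refine ⟨by omega, by omega, ?_⟩
      rw [Bool.eq_false_iff]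
      intro hc
      exact hnotmem ((PySem.Set.mem_ofList _ _).mp ((PySem.Set.contains_iff _ _).mp hc))
    have hset : (slots d pre).set p.2.toNat (some p.1) = slots d (pre ++ [p]) := by
      apply List.ext_getElem
      · simp [slots]
      · intro j hj1 hj2
        have hjlen : j < d.length := by simpa [slots] using hj2
        by_cases hjv : j = p.2.toNat
        · subst hjv
          have hvt : ((p.2.toNat : Nat) : Int) = p.2 := by omega
          have hfindpre : pre.find? (fun q => q.2 == p.2) = none := by
            rw [List.find?_eq_none]
            intro q hq hbe
            exact hnotmem (by simp at hbe; exact hbe ▸ List.mem_map.mpr ⟨q, hq, rfl⟩)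
          rw [List.getElem_set_self (by simpa [slots] using hj1)]
          simp [slots, nmAt, List.find?_append, hvt, hfindpre]
        · have hji : ((j : Nat) : Int) ≠ p.2 := by omega
          rw [List.getElem_set_ne (by omega)]
          simp [slots, nmAt, List.find?_append, Ne.symm hji]
    have hseen : PySem.Set.add (PySem.Set.ofList (pre.map Prod.snd)) p.2
        = PySem.Set.ofList ((pre ++ [p]).map Prod.snd) := by
      simp [PySem.Set.ofList_append_singleton]
    calc (p :: t).foldl (altStep d.length)
          (some (slots d pre, PySem.Set.ofList (pre.map Prod.snd)))
        = t.foldl (altStep d.length)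
            (some (slots d (pre ++ [p]), PySem.Set.ofList ((pre ++ [p]).map Prod.snd))) := by
          simp only [List.foldl_cons, altStep, hguard, hset, hseen, if_false]
      _ = some (slots d d, PySem.Set.ofList (d.map Prod.snd)) :=
          ih (pre ++ [p]) (by simpa using hd)

theorem both_eq_canon {d : List (String × Int)} (hne : d ≠ [])
    (hv : ∀ p ∈ d, 0 ≤ p.2 ∧ p.2 < d.length ∧ (d.map Prod.snd).count p.2 = 1) :
    (let pairs := PySem.List.sorted (d.map (fun p => (p.2, p.1))) (fun x => x.1)
     if pairs = [] then []
     else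
       let expected := (List.range pairs.length).map (fun i : Nat => (i : Int))
       let got := pairs.map (fun p => p.1)
       if got ≠ expected then [] else pairs.map (fun p => p.2))
    = (if d = [] then []
       else
         match d.foldl (altStep d.length)
             (some (List.replicate d.length (none : Option String), PySem.Set.empty)) with
         | none => []
         | some (res, _) => res.map (fun o => o.getD "")) := by
  have hsort := sortedA_eq_canon hv
  have hlen : (canonPairs d).length = d.length := by simp [canonPairs]
  have hfold : d.foldl (altStep d.length)
      (some (List.replicate d.length (none : Option String), PySem.Set.empty))
      = some (slots d d, PySem.Set.ofList (d.map Prod.snd)) := by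
    have h := foldl_altStep_inv hv d [] (by simp)
    rw [slots_nil] at h
    exact h
  have hcne : canonPairs d ≠ [] := by
    intro h
    apply hne
    have := congrArg List.length h
    rw [hlen] at this
    simpa using List.eq_nil_of_length_eq_zero this
  have hgot : (canonPairs d).map (fun p => p.1)
      = (List.range (canonPairs d).length).map (fun i : Nat => (i : Int)) := by
    rw [hlen, canonPairs, List.map_map]
    rfl
  simp only [hsort, hfold]
  rw [if_neg hcne, if_neg hne, if_neg (by simpa using hgot)]
  rw [canonPairs, slots, List.map_map, List.map_map]
  rfl

-- ===== VERDICT (by name: the statement is the Claim_ definition above) =====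
theorem label_names_by_id_py_spec : Claim_equal_label_names_by_id_py := by
  intro label_map _ hpre
  obtain ⟨hne, hv⟩ := hpre
  unfold Spec_label_names_by_id_py label_names_by_id_py label_names_by_id_py_alt
  exact both_eq_canon hne hv
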